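-- pv_equiv track=rewrite | github.com/RelaxJH-DouZhiR/CBFL | AST/ASTjson/ASTjson.py | get_brackets_nesting
-- ===== SOURCE A (Python) =====
-- def get_brackets_nesting(codeStatement):  # 代码内容（返回：括号嵌套层数，括号总数）
--     bracketsStack = []  # 括号栈
--     depth = 0  # 括号深度
--     total = 0  # 括号数量
--     for i in codeStatement:
--         if i == '(':
--             bracketsStack.append(')')
--         elif i == '[':
--             bracketsStack.append(']')
--         elif i == '{':
--             bracketsStack.append('}')
--         if len(bracketsStack) != 0 and (i == ')' or i == ']' or i == '}'):  # 栈不为空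
--             bracketsStack.pop()
--             depth += 1
--         # 计算总数
--         if i == '(' or i == ')' or i == '[' or i == ']' or i == '{' or i == '}':
--             total += 1
--     return depth, total
-- ===== SOURCE B (Python) =====
-- def get_brackets_nesting(codeStatement):
--     # Closed-form: the number of matched closers equals closers + low, where
--     # low is the minimum over all prefixes of the running (openers - closers) sum.
--     openers = 0
--     closers = 0
--     run = 0
--     low = 0
--     for ch in codeStatement:
--         if ch in '([{':
--             openers += 1
--             run += 1
--         elif ch in ')]}':
--             closers += 1
--             run -= 1
--             if run < low:
--                 low = run
--     return closers + low, openers + closers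
-- ===== Notes on version B (the rewrite author's own statement) =====
-- stated objective: alternative
-- what changed: B never simulates matching: instead of a stack popped on each closer, it accumulates opener/closer counts and the prefix minimum of the running open-close balance, and returns depth by the closed formula closers + low (and total = openers + closers).
import Mathlib
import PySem

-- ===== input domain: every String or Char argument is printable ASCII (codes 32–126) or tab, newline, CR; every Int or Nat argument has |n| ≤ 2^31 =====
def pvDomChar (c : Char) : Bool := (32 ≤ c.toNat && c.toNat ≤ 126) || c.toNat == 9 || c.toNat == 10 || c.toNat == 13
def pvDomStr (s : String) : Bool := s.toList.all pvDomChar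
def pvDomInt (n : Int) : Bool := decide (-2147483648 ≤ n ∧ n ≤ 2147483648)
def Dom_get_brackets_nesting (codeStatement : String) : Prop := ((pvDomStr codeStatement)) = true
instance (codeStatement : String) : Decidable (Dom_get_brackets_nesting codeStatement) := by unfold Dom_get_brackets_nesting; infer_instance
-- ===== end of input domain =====

-- B computes the depth by a closed formula (closers + prefix-minimum of the running
-- open-close balance) instead of simulating a stack; objective: alternative.

-- ===== PORT A =====
-- one loop body step of A: state (bracketsStack, depth, total)
def pvStepA (acc : List Char × Int × Int) (i : Char) : List Char × Int × Int :=
  let stack :=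
    if i = '(' then acc.1 ++ [')']
    else if i = '[' then acc.1 ++ [']']
    else if i = '{' then acc.1 ++ ['}']
    else acc.1
  let sd :=
    if stack.length ≠ 0 ∧ (i = ')' ∨ i = ']' ∨ i = '}') then (stack.dropLast, acc.2.1 + 1)
    else (stack, acc.2.1)
  let total := if i = '(' ∨ i = ')' ∨ i = '[' ∨ i = ']' ∨ i = '{' ∨ i = '}' then acc.2.2 + 1 else acc.2.2
  (sd.1, sd.2, total)

def get_brackets_nesting (codeStatement : String) : Int × Int :=
  let r := codeStatement.toList.foldl pvStepA ([], 0, 0)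
  (r.2.1, r.2.2)

-- ===== PORT B =====
-- loop body of B: state (openers, closers, run, low)
def pvStepB (acc : Int × Int × Int × Int) (ch : Char) : Int × Int × Int × Int :=
  if ch = '(' ∨ ch = '[' ∨ ch = '{' then
    (acc.1 + 1, acc.2.1, acc.2.2.1 + 1, acc.2.2.2)
  else if ch = ')' ∨ ch = ']' ∨ ch = '}' then
    let r := acc.2.2.1 - 1
    (acc.1, acc.2.1 + 1, r, if r < acc.2.2.2 then r else acc.2.2.2)
  else acc

def get_brackets_nesting_alt (codeStatement : String) : Int × Int :=
  let st := codeStatement.toList.foldl pvStepB (0, 0, 0, 0)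
  (st.2.1 + st.2.2.2, st.1 + st.2.1)

-- ===== PRECONDITION & SPEC =====
def Spec_get_brackets_nesting (codeStatement : String) (out : Int × Int) : Prop := out = get_brackets_nesting_alt codeStatement
instance (codeStatement : String) (out : Int × Int) : Decidable (Spec_get_brackets_nesting codeStatement out) := by unfold Spec_get_brackets_nesting; infer_instance

-- ===== CLAIM (what is proved, stated in full; the proofs are below) =====
def Claim_equal_get_brackets_nesting : Prop := ∀ (codeStatement : String), Dom_get_brackets_nesting codeStatement → Spec_get_brackets_nesting codeStatement (get_brackets_nesting codeStatement)

-- ===== LEMMAS AND PROOFS =====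

-- One step: A's stack length stays equal to B's run - low, and the differences
-- depthA - (closersB + lowB) and totalA - (openersB + closersB) are preserved.
theorem pv_step (ch : Char) (stack : List Char) (d t o c r low : Int)
    (h : (stack.length : Int) = r - low) :
    ((pvStepA (stack, d, t) ch).1.length : Int)
        = (pvStepB (o, c, r, low) ch).2.2.1 - (pvStepB (o, c, r, low) ch).2.2.2
    ∧ (pvStepA (stack, d, t) ch).2.1 - ((pvStepB (o, c, r, low) ch).2.1 + (pvStepB (o, c, r, low) ch).2.2.2)
        = d - (c + low)
    ∧ (pvStepA (stack, d, t) ch).2.2 - ((pvStepB (o, c, r, low) ch).1 + (pvStepB (o, c, r, low) ch).2.1)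
        = t - (o + c) := by
  by_cases hop : ch = '(' ∨ ch = '[' ∨ ch = '{'
  · rcases hop with h1 | h1 | h1 <;> subst h1 <;>
      · simp [pvStepA, pvStepB]
        omega
  · by_cases hcl : ch = ')' ∨ ch = ']' ∨ ch = '}'
    · rcases hcl with h1 | h1 | h1 <;> subst h1 <;>
        · simp only [pvStepA, pvStepB]
          by_cases hs : stack = []
          · subst hs
            have hr : r = low := by simp at h; omega
            subst hr
            simp
            omega
          · have hl : 0 < stack.length := List.length_pos_iff.mpr hs
            simp [hs, List.length_dropLast]
            split_ifs <;> omega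
    · have e1 : ch ≠ '(' := by rintro rfl; exact hop (Or.inl rfl)
      have e2 : ch ≠ '[' := by rintro rfl; exact hop (Or.inr (Or.inl rfl))
      have e3 : ch ≠ '{' := by rintro rfl; exact hop (Or.inr (Or.inr rfl))
      have e4 : ch ≠ ')' := by rintro rfl; exact hcl (Or.inl rfl)
      have e5 : ch ≠ ']' := by rintro rfl; exact hcl (Or.inr (Or.inl rfl))
      have e6 : ch ≠ '}' := by rintro rfl; exact hcl (Or.inr (Or.inr rfl))
      simp [pvStepA, pvStepB, e1, e2, e3, e4, e5, e6]
      omega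

-- Loop invariant, by induction on the character list.
theorem pv_loop_inv (l : List Char) :
    ∀ (stack : List Char) (d t o c r low : Int),
      (stack.length : Int) = r - low →
      ((l.foldl pvStepA (stack, d, t)).1.length : Int)
          = (l.foldl pvStepB (o, c, r, low)).2.2.1 - (l.foldl pvStepB (o, c, r, low)).2.2.2
      ∧ (l.foldl pvStepA (stack, d, t)).2.1
            - ((l.foldl pvStepB (o, c, r, low)).2.1 + (l.foldl pvStepB (o, c, r, low)).2.2.2)
          = d - (c + low)
      ∧ (l.foldl pvStepA (stack, d, t)).2.2
            - ((l.foldl pvStepB (o, c, r, low)).1 + (l.foldl pvStepB (o, c, r, low)).2.1)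
          = t - (o + c) := by
  induction l with
  | nil =>
    intro stack d t o c r low h
    simp only [List.foldl_nil]
    exact ⟨h, trivial, trivial⟩
  | cons ch cs ih =>
    intro stack d t o c r low h
    have hstep := pv_step ch stack d t o c r low h
    have hrec := ih (pvStepA (stack, d, t) ch).1 (pvStepA (stack, d, t) ch).2.1
      (pvStepA (stack, d, t) ch).2.2 (pvStepB (o, c, r, low) ch).1
      (pvStepB (o, c, r, low) ch).2.1 (pvStepB (o, c, r, low) ch).2.2.1
      (pvStepB (o, c, r, low) ch).2.2.2 hstep.1
    simp only [Prod.mk.eta] at hrec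
    simp only [List.foldl_cons]
    exact ⟨hrec.1, by omega, by omega⟩

-- ===== VERDICT (by name: the statement is the Claim_ definition above) =====
theorem get_brackets_nesting_spec : Claim_equal_get_brackets_nesting := by
  unfold Claim_equal_get_brackets_nesting
  intro s _
  unfold Spec_get_brackets_nesting get_brackets_nesting get_brackets_nesting_alt
  obtain ⟨h1, h2, h3⟩ := pv_loop_inv s.toList [] 0 0 0 0 0 0 (by simp)
  dsimp only
  refine Prod.ext ?_ ?_ <;> dsimp only <;> omega
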